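-- pv_equiv track=rewrite | github.com/Airbus5717/a7-py | test/test_iterative_traversal.py | make_nested_ifs
-- ===== SOURCE A (Python) =====
-- def make_nested_ifs(depth: int) -> str:
--     """Generate a program with `depth` levels of nested if/else statements."""
--     lines = [
--         'io :: import "std/io"',
--         "",
--         "main :: fn() {",
--     ]
--     for i in range(depth):
--         indent = "    " * (i + 1)
--         lines.append(f"{indent}if true {{")
--     # innermost body
--     inner_indent = "    " * (depth + 1)
--     lines.append(f"{inner_indent}io.println(\"deep\")")
--     for i in range(depth - 1, -1, -1):
--         indent = "    " * (i + 1)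
--         lines.append(f"{indent}}} else {{")
--         lines.append(f"{indent}    io.println(\"else\")")
--         lines.append(f"{indent}}}")
--     lines.append("}")
--     return "\n".join(lines)
-- ===== SOURCE B (Python) =====
-- def make_nested_ifs(depth: int) -> str:
--     """Generate a program with `depth` levels of nested if/else statements."""
--     out = ['io :: import "std/io"', "", "main :: fn() {"]
--     pending = []  # stack of closing blocks, innermost on top
--     for level in range(depth):
--         ind = "    " * (level + 1)
--         out.append(ind + "if true {")
--         pending.append([ind + "} else {",
--                         ind + '    io.println("else")',
--                         ind + "}"])
--     out.append("    " * (depth + 1) + 'io.println("deep")')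
--     while pending:
--         out.extend(pending.pop())
--     out.append("}")
--     return "\n".join(out)
-- ===== Notes on version B (the rewrite author's own statement) =====
-- stated objective: alternative
-- what changed: Replaced A's two index loops (opening ifs forward, then closers regenerated from a backward range) with a single forward pass that emits each opening line and pushes its closing block onto an explicit stack, which is then unwound.
import Mathlib
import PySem

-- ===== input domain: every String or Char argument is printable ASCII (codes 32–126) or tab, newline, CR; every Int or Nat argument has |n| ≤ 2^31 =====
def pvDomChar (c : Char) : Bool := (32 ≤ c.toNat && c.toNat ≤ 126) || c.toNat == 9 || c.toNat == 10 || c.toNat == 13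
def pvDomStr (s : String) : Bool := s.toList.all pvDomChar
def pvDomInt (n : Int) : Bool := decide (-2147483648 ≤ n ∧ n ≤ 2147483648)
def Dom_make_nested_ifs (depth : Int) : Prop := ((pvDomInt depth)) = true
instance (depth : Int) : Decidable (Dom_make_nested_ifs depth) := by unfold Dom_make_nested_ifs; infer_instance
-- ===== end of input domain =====

-- B replaces A's two index loops (closers regenerated from a backward range) with one forward
-- pass that pushes each closing block onto an explicit stack, then unwinds it (alternative decomposition).

-- Python's '"    " * n' (negative n yields ""): exact, incl. the negative clamp.
def pvInd (n : Int) : String := String.ofList (List.replicate (4 * n.toNat) ' ')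

-- ===== PORT A =====
def make_nested_ifs (depth : Int) : String :=
  let lines : List String := ["io :: import \"std/io\"", "", "main :: fn() {"]
  let lines := (PySem.List.pyRange 0 depth 1).foldl
      (fun acc i => acc ++ [pvInd (i + 1) ++ "if true {"]) lines
  let lines := lines ++ [pvInd (depth + 1) ++ "io.println(\"deep\")"]
  let lines := (PySem.List.pyRange (depth - 1) (-1) (-1)).foldl
      (fun acc i => acc ++ [pvInd (i + 1) ++ "} else {",
                            pvInd (i + 1) ++ "    io.println(\"else\")",
                            pvInd (i + 1) ++ "}"]) lines
  let lines := lines ++ ["}"]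
  PySem.Str.join "\n" lines

-- ===== PORT B =====
def make_nested_ifs_alt (depth : Int) : String :=
  let start : List String × List (List String) :=
    (["io :: import \"std/io\"", "", "main :: fn() {"], [])
  let st := (PySem.List.pyRange 0 depth 1).foldl
      (fun (p : List String × List (List String)) level =>
        (p.1 ++ [pvInd (level + 1) ++ "if true {"],
         p.2 ++ [[pvInd (level + 1) ++ "} else {",
                  pvInd (level + 1) ++ "    io.println(\"else\")",
                  pvInd (level + 1) ++ "}"]])) start
  let out := st.1 ++ [pvInd (depth + 1) ++ "io.println(\"deep\")"]
  -- 'while pending: out.extend(pending.pop())' pops the stack top-first = fold over the reverse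
  let out := st.2.reverse.foldl (fun acc blk => acc ++ blk) out
  PySem.Str.join "\n" (out ++ ["}"])

-- ===== PRECONDITION & SPEC =====
def Spec_make_nested_ifs (depth : Int) (out : String) : Prop := out = make_nested_ifs_alt depth
instance (depth : Int) (out : String) : Decidable (Spec_make_nested_ifs depth out) := by unfold Spec_make_nested_ifs; infer_instance

-- ===== CLAIM (what is proved, stated in full; the proofs are below) =====
def Claim_equal_make_nested_ifs : Prop := ∀ (depth : Int), Dom_make_nested_ifs depth → Spec_make_nested_ifs depth (make_nested_ifs depth)

-- ===== LEMMAS AND PROOFS =====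

theorem make_nested_ifs_spec : Claim_equal_make_nested_ifs := by
  intro depth _
  unfold Spec_make_nested_ifs make_nested_ifs make_nested_ifs_alt
  dsimp only
  have hrev : PySem.List.pyRange (depth - 1) (-1) (-1)
      = (PySem.List.pyRange 0 depth 1).reverse := by
    have := PySem.List.pyRange_neg_one_eq_reverse (depth - 1) (-1)
    simpa using this
  have hst := PySem.List.foldl_prod_mk
      (fun (acc : List String) (level : Int) => acc ++ [pvInd (level + 1) ++ "if true {"])
      (fun (acc : List (List String)) (level : Int) =>
        acc ++ [[pvInd (level + 1) ++ "} else {",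
                 pvInd (level + 1) ++ "    io.println(\"else\")",
                 pvInd (level + 1) ++ "}"]])
      (PySem.List.pyRange 0 depth 1)
      (["io :: import \"std/io\"", "", "main :: fn() {"]) ([] : List (List String))
  rw [hst]
  rw [PySem.List.foldl_append_eq_flatMap (g := fun (blk : List String) => blk)]
  simp only [PySem.List.foldl_append_eq_flatMap, hrev]
  simp [List.flatMap_assoc, List.flatMap_reverse, Function.comp_def]
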